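-- pv_equiv track=rewrite | github.com/sherweipng/news_crawl_deploy | app.py | strip_source_from_title
-- ===== SOURCE A (Python) =====
-- def strip_source_from_title(title, returnValue="title"):
--     arr = title.split("-")
--     source = arr[len(arr) -1]
--     t = ""
--     for a in range(len(arr)-1):
--         if (a != len(arr)-2):
--             t = t + arr[a] + "-"
--         else:
--             t = t + arr[a]
--     if returnValue == "title":
--         return t.rstrip()
--     elif returnValue == "source":
--         return source.strip()
--     else:
--         raise ReferenceError("Input for 'returnValue' is invalid")
-- ===== SOURCE B (Python) =====
-- def strip_source_from_title(title, returnValue="title"):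
--     head, _, tail = title.rpartition("-")
--     if returnValue == "title":
--         return head.rstrip()
--     elif returnValue == "source":
--         return tail.strip()
--     else:
--         raise ReferenceError("Input for 'returnValue' is invalid")
-- ===== Notes on version B (the rewrite author's own statement) =====
-- stated objective: idiomatic
-- what changed: Replaces split-into-list + index-loop rebuild of all-but-last with a single str.rpartition at the last hyphen; no list, no loop.
import Mathlib
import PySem

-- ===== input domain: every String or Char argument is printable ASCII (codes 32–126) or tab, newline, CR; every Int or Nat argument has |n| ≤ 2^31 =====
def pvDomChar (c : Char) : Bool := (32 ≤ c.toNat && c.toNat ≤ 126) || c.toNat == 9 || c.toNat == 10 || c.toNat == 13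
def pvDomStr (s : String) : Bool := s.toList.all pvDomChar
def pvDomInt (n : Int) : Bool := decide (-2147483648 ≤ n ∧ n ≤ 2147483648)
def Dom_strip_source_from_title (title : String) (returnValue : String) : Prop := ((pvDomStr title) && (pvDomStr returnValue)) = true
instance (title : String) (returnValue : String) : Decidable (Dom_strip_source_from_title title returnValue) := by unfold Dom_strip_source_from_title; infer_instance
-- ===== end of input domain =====

-- B replaces A's split-into-list + index-loop rebuild with a single rpartition at the last hyphen (idiomatic, no loop).


-- ===== PORT A =====
-- Literal port of A on the code-point (List Char) side, as PySem prescribes: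
-- arr = title.split("-"); source = arr[len(arr)-1]; loop over range(len(arr)-1) rebuilding t.
def strip_source_from_title (title : String) (returnValue : String) : String :=
  let arr := (PySem.Chars.split? title.toList ['-']).getD []   -- sep "-" ≠ "" so split? is always some
  let source := (PySem.List.pyGet? arr ((arr.length : Int) - 1)).getD []
  let t := (PySem.List.pyRange 0 ((arr.length : Int) - 1)).foldl
    (fun t a =>
      if a ≠ (arr.length : Int) - 2
      then t ++ (PySem.List.pyGet? arr a).getD [] ++ ['-']
      else t ++ (PySem.List.pyGet? arr a).getD []) []
  if returnValue = "title" then String.ofList (PySem.Chars.rstrip t)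
  else if returnValue = "source" then String.ofList (PySem.Chars.strip source)
  else ""   -- Python raises ReferenceError here; excluded by Pre_

-- ===== PORT B =====
-- Literal port of B: head, _, tail = title.rpartition("-") (last occurrence via rfind), then the same two branches.
def strip_source_from_title_alt (title : String) (returnValue : String) : String :=
  let cs := title.toList
  let i := PySem.Chars.rfind cs ['-']
  let head := if i < 0 then [] else cs.take i.toNat
  let tail := if i < 0 then cs else cs.drop (i.toNat + 1)
  if returnValue = "title" then String.ofList (PySem.Chars.rstrip head)
  else if returnValue = "source" then String.ofList (PySem.Chars.strip tail)
  else ""   -- Python raises ReferenceError here; excluded by Pre_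

-- ===== PRECONDITION & SPEC =====
-- A raises ReferenceError unless returnValue is "title" or "source"; exactly those inputs are excluded.
def Pre_strip_source_from_title (title : String) (returnValue : String) : Prop :=
  returnValue = "title" ∨ returnValue = "source"
instance (title : String) (returnValue : String) : Decidable (Pre_strip_source_from_title title returnValue) := by unfold Pre_strip_source_from_title; infer_instance
def pvWitness_strip_source_from_title : String × String := ("breaking news - BBC", "title")

def Spec_strip_source_from_title (title : String) (returnValue : String) (out : String) : Prop := out = strip_source_from_title_alt title returnValue
instance (title : String) (returnValue : String) (out : String) : Decidable (Spec_strip_source_from_title title returnValue out) := by unfold Spec_strip_source_from_title; infer_instance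

-- ===== CLAIM (what is proved, stated in full; the proofs are below) =====
def Claim_equal_strip_source_from_title : Prop := ∀ (title : String) (returnValue : String), Dom_strip_source_from_title title returnValue → Pre_strip_source_from_title title returnValue → Spec_strip_source_from_title title returnValue (strip_source_from_title title returnValue)

-- ===== LEMMAS AND PROOFS =====

-- A simple first-principles model of s.split("-") on code points.
theorem modifyHead_congr {α : Type} (f g : α → α) (l : List α) (h : ∀ x, f x = g x) :
    l.modifyHead f = l.modifyHead g := by rw [funext h]

theorem modifyHead_id' {α : Type} (l : List α) : l.modifyHead (fun x => x) = l := by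
  show List.modifyHead id l = l
  rw [List.modifyHead_id, id]

def split1 : List Char → List (List Char)
  | [] => [[]]
  | c :: rest => if c = '-' then [] :: split1 rest else (split1 rest).modifyHead (c :: ·)

theorem go_spec (l : List Char) : ∀ (fuel : Nat) (cur : List Char) (acc : List (List Char)),
    l.length ≤ fuel →
    PySem.Chars.splitOn.go ['-'] fuel l cur acc
      = acc.reverse ++ (split1 l).modifyHead (cur.reverse ++ ·) := by
  induction l with
  | nil =>
    intro fuel cur acc _
    cases fuel <;> simp [PySem.Chars.splitOn.go, split1]
  | cons c rest ih =>
    intro fuel cur acc h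
    cases fuel with
    | zero => simp at h
    | succ f =>
      rw [PySem.Chars.splitOn.go]
      by_cases hc : c = '-'
      · subst hc
        have hpc : (List.isPrefixOf ['-'] ('-' :: rest)) = true := by simp [List.isPrefixOf]
        rw [hpc]
        simp only [if_true]
        rw [show List.drop (['-'] : List Char).length ('-' :: rest) = rest from rfl]
        rw [ih f [] _ (by simp at h; omega)]
        simp [split1, modifyHead_id']
      · have hpc : (List.isPrefixOf ['-'] (c :: rest)) = false := by
          simp [List.isPrefixOf]; exact fun h' => hc h'.symm
        rw [hpc]
        simp only [Bool.false_eq_true, if_false]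
        rw [ih f (c :: cur) acc (by simp at h; omega)]
        simp only [split1, hc, if_false, List.modifyHead_modifyHead]
        congr 1
        exact modifyHead_congr _ _ _ (fun x => by simp)

theorem splitOn_eq (cs : List Char) : PySem.Chars.splitOn cs ['-'] = split1 cs := by
  rw [PySem.Chars.splitOn, go_spec cs (cs.length + 1) [] [] (by omega)]
  simp only [List.reverse_nil, List.nil_append]
  rw [modifyHead_congr _ (fun x => x) _ (fun x => by simp), modifyHead_id']

theorem split1_cons (cs : List Char) : ∃ p ps, split1 cs = p :: ps := by
  induction cs with
  | nil => exact ⟨[], [], rfl⟩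
  | cons c rest ih =>
    obtain ⟨p, ps, hp⟩ := ih
    by_cases hc : c = '-'
    · exact ⟨[], split1 rest, by simp [split1, hc]⟩
    · exact ⟨c :: p, ps, by simp [split1, hc, hp]⟩

theorem split1_no_dash (cs : List Char) (h : '-' ∉ cs) : split1 cs = [cs] := by
  induction cs with
  | nil => rfl
  | cons c rest ih =>
    simp at h
    have hc : ¬ c = '-' := fun hh => h.1 hh.symm
    simp [split1, hc, ih h.2]

theorem split1_last (xs ys : List Char) (h : '-' ∉ ys) :
    split1 (xs ++ '-' :: ys) = split1 xs ++ [ys] := by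
  induction xs with
  | nil => simp [split1, split1_no_dash ys h]
  | cons x xs ih =>
    obtain ⟨p, ps, hp⟩ := split1_cons (xs ++ '-' :: ys)
    by_cases hx : x = '-'
    · simp [split1, hx, ih]
    · obtain ⟨q, qs, hq⟩ := split1_cons xs
      simp [split1, hx, ih, hq]

theorem join_split1 (cs : List Char) : PySem.Chars.join ['-'] (split1 cs) = cs := by
  induction cs with
  | nil => simp [split1, PySem.Chars.join_singleton]
  | cons c rest ih =>
    obtain ⟨p, ps, hp⟩ := split1_cons rest
    by_cases hc : c = '-'
    · rw [hp] at ih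
      simp [split1, hc, hp, PySem.Chars.join_cons_cons, ih]
    · cases ps with
      | nil =>
        rw [hp] at ih; simp [PySem.Chars.join_singleton] at ih
        simp [split1, hc, hp, PySem.Chars.join_singleton, ih]
      | cons q qs =>
        have hg : split1 (c :: rest) = (c :: p) :: q :: qs := by simp [split1, hc, hp]
        rw [hg, PySem.Chars.join_cons_cons]
        rw [hp, PySem.Chars.join_cons_cons] at ih
        simpa using congrArg (c :: ·) ih

-- rfind ['-'] characterisation
theorem rgo_spec (cs : List Char) : ∀ (j : Nat), '-' ∉ cs.drop (j + 1) →
    (PySem.Chars.rfind.go cs ['-'] j = -1 ∧ '-' ∉ cs) ∨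
    (∃ i : Nat, PySem.Chars.rfind.go cs ['-'] j = (i : Int) ∧ i ≤ j ∧ cs[i]? = some '-' ∧
      '-' ∉ cs.drop (i + 1)) := by
  intro j
  induction j with
  | zero =>
    intro h
    rw [PySem.Chars.rfind.go]
    cases cs with
    | nil => exact Or.inl ⟨by rw [show List.isPrefixOf ['-'] ([] : List Char) = false from rfl]; simp, by simp⟩
    | cons a t =>
      by_cases ha : a = '-'
      · have hcond : List.isPrefixOf ['-'] (a :: t) = true := by simp [List.isPrefixOf, ha]
        rw [hcond]
        simp only [if_true]
        exact Or.inr ⟨0, by simp, le_refl 0, by simp [ha], by simpa using h⟩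
      · have hcond : List.isPrefixOf ['-'] (a :: t) = false := by
          simp [List.isPrefixOf]; exact fun hh => ha hh.symm
        rw [hcond]
        simp only [Bool.false_eq_true, if_false]
        refine Or.inl ⟨by simp, ?_⟩
        simp only [List.mem_cons, not_or]
        exact ⟨fun hh => ha hh.symm, by simpa using h⟩
  | succ j ih =>
    intro h
    rw [PySem.Chars.rfind.go]
    cases hd : cs.drop (j + 1) with
    | nil =>
      rw [show List.isPrefixOf ['-'] ([] : List Char) = false from rfl]
      simp only [Bool.false_eq_true, if_false]
      rcases ih (by simp [hd]) with h1 | ⟨i, h1, h2, h3, h4⟩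
      · exact Or.inl h1
      · exact Or.inr ⟨i, h1, Nat.le_succ_of_le h2, h3, h4⟩
    | cons a t =>
      have hh : cs[j + 1]? = some a := by rw [← List.head?_drop, hd]; rfl
      have ht : cs.drop (j + 1 + 1) = t := by
        have h1 : List.drop 1 (cs.drop (j + 1)) = cs.drop (j + 1 + 1) := List.drop_drop
        rw [hd] at h1; simpa using h1.symm
      by_cases ha : a = '-'
      · rw [show List.isPrefixOf ['-'] (a :: t) = true by simp [List.isPrefixOf, ha]]
        simp only [if_true]
        exact Or.inr ⟨j + 1, by simp, le_refl _, by rw [hh, ha], by rw [ht]; simpa [ht] using h⟩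
      · rw [show List.isPrefixOf ['-'] (a :: t) = false by
          simp [List.isPrefixOf]; exact fun hh' => ha hh'.symm]
        simp only [Bool.false_eq_true, if_false]
        have h' : '-' ∉ cs.drop (j + 1) := by
          rw [hd]
          simp only [List.mem_cons, not_or]
          refine ⟨fun hh' => ha hh'.symm, ?_⟩
          rw [← ht]; simpa using h
        rcases ih h' with h1 | ⟨i, h1, h2, h3, h4⟩
        · exact Or.inl h1
        · exact Or.inr ⟨i, h1, Nat.le_succ_of_le h2, h3, h4⟩

theorem rfind_spec (cs : List Char) :
    (PySem.Chars.rfind cs ['-'] = -1 ∧ '-' ∉ cs) ∨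
    (∃ i : Nat, PySem.Chars.rfind cs ['-'] = (i : Int) ∧ i < cs.length ∧ cs[i]? = some '-' ∧
      '-' ∉ cs.drop (i + 1)) := by
  rw [PySem.Chars.rfind]
  rcases rgo_spec cs cs.length (by rw [List.drop_eq_nil_of_le (by omega)]; simp) with h | ⟨i, h1, _, h3, h4⟩
  · exact Or.inl h
  · right
    exact ⟨i, h1, by by_contra hlt; simp at hlt; simp [List.getElem?_eq_none hlt] at h3, h3, h4⟩

-- index flatMap lemma
theorem flatMap_range_index {α β : Type} (l : List α) (d : α) (f : α → List β) :
    (List.range l.length).flatMap (fun a => f (l[a]?.getD d)) = l.flatMap f := by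
  induction l with
  | nil => simp
  | cons x xs ih =>
    rw [List.length_cons, List.range_succ_eq_map]
    simp only [List.flatMap_cons, List.flatMap_map]
    simp only [List.getElem?_cons_zero, Option.getD_some, List.getElem?_cons_succ]
    rw [ih]

theorem flatten_map_dash (rs : List (List Char)) (h : rs ≠ []) :
    rs.flatMap (fun x => x ++ ['-']) = PySem.Chars.join ['-'] rs ++ ['-'] := by
  induction rs with
  | nil => simp at h
  | cons x xs ih =>
    cases xs with
    | nil => simp [PySem.Chars.join_singleton]
    | cons y ys =>
      rw [List.flatMap_cons, ih (by simp), PySem.Chars.join_cons_cons]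
      simp [List.append_assoc]

theorem join_concat (rs : List (List Char)) (z : List Char) (h : rs ≠ []) :
    PySem.Chars.join ['-'] (rs ++ [z]) = PySem.Chars.join ['-'] rs ++ ['-'] ++ z := by
  induction rs with
  | nil => simp at h
  | cons x xs ih =>
    cases xs with
    | nil => simp [PySem.Chars.join_cons_cons, PySem.Chars.join_singleton]
    | cons y ys =>
      rw [List.cons_append, List.cons_append, PySem.Chars.join_cons_cons,
        show y :: (ys ++ [z]) = (y :: ys) ++ [z] from rfl, ih (by simp),
        PySem.Chars.join_cons_cons]
      simp [List.append_assoc]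

theorem cond_flatMap (qs : List (List Char)) (y : List Char) :
    (List.range qs.length).flatMap
      (fun (a : Nat) => ((qs ++ [y])[a]?.getD [] ++ if (a : Int) = (qs.length : Int) - 1 then [] else ['-']))
      = PySem.Chars.join ['-'] qs := by
  induction qs using List.reverseRecOn with
  | nil => simp [PySem.Chars.join_nil]
  | append_singleton rs z ih =>
    rw [List.length_append, List.length_singleton, List.range_succ, List.flatMap_append]
    have hlast : (List.flatMap
        (fun (a : Nat) => ((rs ++ [z] ++ [y])[a]?.getD [] ++
          if (a : Int) = ((rs.length + 1 : Nat) : Int) - 1 then [] else ['-'])) [rs.length]) = z := by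
      have h1 : (rs ++ [z] ++ [y])[rs.length]? = some z := by
        rw [List.getElem?_append_left (by simp), List.getElem?_concat_length]
      rw [List.flatMap_cons, List.flatMap_nil, h1]
      simp
    rw [hlast]
    have hfirst : (List.range rs.length).flatMap
        (fun (a : Nat) => ((rs ++ [z] ++ [y])[a]?.getD [] ++
          if (a : Int) = ((rs.length + 1 : Nat) : Int) - 1 then [] else ['-']))
        = rs.flatMap (fun x => x ++ ['-']) := by
      rw [← flatMap_range_index rs [] (fun x => x ++ ['-'])]
      refine List.flatMap_congr (fun a ha => ?_)
      have halt : a < rs.length := List.mem_range.mp ha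
      have h1 : (rs ++ [z] ++ [y])[a]? = rs[a]? := by
        rw [List.getElem?_append_left (by simp; omega), List.getElem?_append_left halt]
      have h2 : ¬ ((a : Int) = ((rs.length + 1 : Nat) : Int) - 1) := by
        push_cast
        omega
      rw [h1, if_neg h2]
    rw [hfirst]
    cases hrs : rs with
    | nil => simp [PySem.Chars.join_singleton]
    | cons r rt =>
      rw [← hrs, flatten_map_dash rs (by simp [hrs]), join_concat rs z (by simp [hrs])]

theorem pyRange_zero_natCast (k : Nat) :
    PySem.List.pyRange 0 (k : Int) = (List.range k).map (Nat.cast : Nat → Int) := by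
  induction k with
  | zero => simp [PySem.List.pyRange]
  | succ n ih =>
    rw [show ((n + 1 : Nat) : Int) = (n : Int) + 1 by push_cast; ring]
    rw [PySem.List.pyRange_one_append 0 (n : Int) ((n : Int) + 1) (by omega) (by omega)]
    rw [PySem.List.pyRange_one_cons (by omega : (n : Int) < (n : Int) + 1)]
    rw [show PySem.List.pyRange ((n : Int) + 1) ((n : Int) + 1) = [] by simp [PySem.List.pyRange]]
    rw [ih, List.range_succ]
    simp

theorem loop_eq (qs : List (List Char)) (y : List Char) :
    (PySem.List.pyRange 0 (((qs ++ [y]).length : Int) - 1)).foldl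
      (fun t a =>
        if a ≠ ((qs ++ [y]).length : Int) - 2
        then t ++ (PySem.List.pyGet? (qs ++ [y]) a).getD [] ++ ['-']
        else t ++ (PySem.List.pyGet? (qs ++ [y]) a).getD []) []
      = PySem.Chars.join ['-'] qs := by
  rw [PySem.List.foldl_congr_mem _ _
    (fun t a => t ++ ((PySem.List.pyGet? (qs ++ [y]) a).getD [] ++
      if (a : Int) = ((qs ++ [y]).length : Int) - 2 then [] else ['-'])) []
    (fun acc x _ => by
      beta_reduce
      by_cases hx : x = ((qs ++ [y]).length : Int) - 2
      · rw [if_neg (not_not_intro hx), if_pos hx, List.append_nil]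
      · rw [if_pos hx, if_neg hx, List.append_assoc])]
  rw [PySem.List.foldl_append_eq_flatMap]
  rw [show (((qs ++ [y]).length : Int) - 1) = (qs.length : Int) by
    push_cast [List.length_append, List.length_singleton]; ring]
  rw [pyRange_zero_natCast, List.flatMap_map]
  rw [List.nil_append]
  rw [← cond_flatMap qs y]
  refine List.flatMap_congr (fun a _ => ?_)
  rw [PySem.List.pyGet?_natCast]
  have h2 : (((qs ++ [y]).length : Int) - 2) = (qs.length : Int) - 1 := by
    push_cast [List.length_append, List.length_singleton]; ring
  rw [h2]

-- ===== VERDICT (by name: the statement is the Claim_ definition above) =====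
theorem strip_source_from_title_spec : Claim_equal_strip_source_from_title := by
  intro title returnValue _ hpre
  unfold Spec_strip_source_from_title
  simp only [strip_source_from_title, strip_source_from_title_alt]
  have hsp : (PySem.Chars.split? title.toList ['-']).getD [] = split1 title.toList := by
    rw [PySem.Chars.split?]
    simp [splitOn_eq]
  rcases rfind_spec title.toList with ⟨hr, hnd⟩ | ⟨i, hr, hlen, hget, hnd⟩
  · -- no hyphen in the title
    have harr : (PySem.Chars.split? title.toList ['-']).getD [] = [] ++ [title.toList] := by
      rw [hsp, split1_no_dash _ hnd]; rfl
    rw [harr, hr, loop_eq [] title.toList]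
    have hsrc : (PySem.List.pyGet? ([] ++ [title.toList])
        ((([] ++ [title.toList] : List (List Char)).length : Int) - 1)).getD [] = title.toList := by
      rw [show ((([] ++ [title.toList] : List (List Char)).length : Int) - 1) = ((0 : Nat) : Int) by
        simp]
      rw [PySem.List.pyGet?_natCast]
      rfl
    rw [hsrc]
    rcases hpre with hp | hp <;> subst hp <;> simp [PySem.Chars.join_nil]
  · -- last hyphen at index i
    have hc : title.toList[i] = '-' := by
      rw [List.getElem?_eq_getElem hlen] at hget
      exact Option.some.inj hget
    have hdec : title.toList = title.toList.take i ++ '-' :: title.toList.drop (i + 1) := by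
      conv_lhs => rw [← List.take_append_drop i title.toList]
      rw [List.drop_eq_getElem_cons hlen, hc]
    have harr : (PySem.Chars.split? title.toList ['-']).getD []
        = split1 (title.toList.take i) ++ [title.toList.drop (i + 1)] := by
      rw [hsp]
      conv_lhs => rw [hdec]
      exact split1_last _ _ hnd
    rw [harr, hr, loop_eq (split1 (title.toList.take i)) (title.toList.drop (i + 1))]
    have hsrc : (PySem.List.pyGet?
        (split1 (title.toList.take i) ++ [title.toList.drop (i + 1)])
        (((split1 (title.toList.take i) ++ [title.toList.drop (i + 1)]).length : Int) - 1)).getD []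
        = title.toList.drop (i + 1) := by
      rw [show (((split1 (title.toList.take i) ++ [title.toList.drop (i + 1)]).length : Int) - 1)
          = (((split1 (title.toList.take i)).length : Nat) : Int) by simp]
      rw [PySem.List.pyGet?_natCast, List.getElem?_concat_length]
      rfl
    rw [hsrc, join_split1]
    have hneg : ¬ ((i : Nat) : Int) < 0 := by omega
    rw [if_neg hneg]
    rw [show ((i : Nat) : Int).toNat = i from Int.toNat_natCast i]
    rcases hpre with hp | hp <;> subst hp <;> simp [hneg]
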